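-- pv_equiv track=rewrite | github.com/JackTriton0901/PyTetris | PyTetris.py | make_field
-- ===== SOURCE A (Python) =====
-- def make_field(field_list = None):
--     fielded = []
--     if field_list != None:
--         if type(field_list) is list:
--             fielded = field_list
--     else:
--         for y in range(26):
--             sub = []
--             for x in range(16):
--                 if x==0 or x>=11 or y>=21 :
--                     sub.append(40)
--                 else :
--                     sub.append(50)
--             fielded.append(sub)
--     return fielded
-- ===== SOURCE B (Python) =====
-- def make_field(field_list=None):
--     if field_list is not None:
--         return field_list if type(field_list) is list else []
--     interior = [40] + [50] * 10 + [40] * 5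
--     border = [40] * 16
--     return [interior[:] for _ in range(21)] + [border[:] for _ in range(5)]
-- ===== Notes on version B (the rewrite author's own statement) =====
-- stated objective: simpler
-- what changed: Replaces the per-cell x==0/x>=11/y>=21 branching loop with two template rows (interior and border) replicated 21 and 5 times.
import Mathlib
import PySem

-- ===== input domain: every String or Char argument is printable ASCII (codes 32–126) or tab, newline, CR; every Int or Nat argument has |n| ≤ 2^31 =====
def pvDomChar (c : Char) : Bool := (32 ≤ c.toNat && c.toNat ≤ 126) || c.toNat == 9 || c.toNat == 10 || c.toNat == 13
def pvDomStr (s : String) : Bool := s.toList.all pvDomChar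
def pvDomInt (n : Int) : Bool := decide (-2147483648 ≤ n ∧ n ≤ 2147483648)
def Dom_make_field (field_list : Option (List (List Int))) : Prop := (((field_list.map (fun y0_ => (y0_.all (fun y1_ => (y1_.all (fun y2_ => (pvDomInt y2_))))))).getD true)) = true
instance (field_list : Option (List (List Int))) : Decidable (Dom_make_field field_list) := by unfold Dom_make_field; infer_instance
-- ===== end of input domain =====

-- ===== PORT A =====
-- B builds the grid from two template rows replicated, instead of a per-cell branch (simpler decomposition).
def make_field (field_list : Option (List (List Int))) : List (List Int) :=
  match field_list with
  | some l => l          -- field_list != None and is a list (the type guarantees list-ness)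
  | none =>
    (PySem.List.pyRange 0 26 1).foldl (fun fielded y =>
      let sub := (PySem.List.pyRange 0 16 1).foldl (fun sub x =>
        if x == 0 || x ≥ 11 || y ≥ 21 then sub ++ [(40 : Int)] else sub ++ [(50 : Int)]) []
      fielded ++ [sub]) []

-- ===== PORT B =====
def make_field_alt (field_list : Option (List (List Int))) : List (List Int) :=
  match field_list with
  | some l => l
  | none =>
    let interior : List Int := [40] ++ List.replicate 10 50 ++ List.replicate 5 40
    let border : List Int := List.replicate 16 40
    List.replicate 21 interior ++ List.replicate 5 border

-- ===== PRECONDITION & SPEC =====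
def Spec_make_field (field_list : Option (List (List Int))) (out : List (List Int)) : Prop := out = make_field_alt field_list
instance (field_list : Option (List (List Int))) (out : List (List Int)) : Decidable (Spec_make_field field_list out) := by unfold Spec_make_field; infer_instance

-- ===== CLAIM (what is proved, stated in full; the proofs are below) =====
def Claim_equal_make_field : Prop := ∀ (field_list : Option (List (List Int))), Dom_make_field field_list → Spec_make_field field_list (make_field field_list)

-- ===== LEMMAS AND PROOFS =====

-- ===== VERDICT (by name: the statement is the Claim_ definition above) =====
theorem make_field_spec : Claim_equal_make_field := by
  intro fl _
  unfold Spec_make_field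
  cases fl with
  | some l => rfl
  | none => decide
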